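-- pv_equiv track=rewrite | github.com/barbedorafael/flood-qc | src/storage/db_bootstrap.py | _station_code_to_int
-- ===== SOURCE A (Python) =====
-- def _station_code_to_int(station_code: str) -> int:
--     pieces: list[str] = []
--     for char in station_code.strip().upper():
--         if char.isdigit():
--             pieces.append(char)
--         elif "A" <= char <= "Z":
--             pieces.append(str(ord(char) - ord("A") + 1))
--         else:
--             raise ValueError(f"Caractere invalido em station_code: {station_code!r}")
--     if not pieces:
--         raise ValueError("station_code vazio nao e suportado.")
--     return int("".join(pieces))
-- ===== SOURCE B (Python) =====
-- def _station_code_to_int(station_code: str) -> int: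
--     normalized = station_code.strip().upper()
--     if not normalized:
--         raise ValueError("station_code vazio nao e suportado.")
--     acc = 0
--     for char in normalized:
--         if char.isdigit():
--             acc = acc * 10 + (ord(char) - ord("0"))
--         elif "A" <= char <= "Z":
--             n = ord(char) - ord("A") + 1
--             acc = acc * (100 if n >= 10 else 10) + n
--         else:
--             raise ValueError(f"Caractere invalido em station_code: {station_code!r}")
--     return acc
-- ===== Notes on version B (the rewrite author's own statement) =====
-- stated objective: alternative
-- what changed: A encodes each character as a decimal-digit string, joins the pieces and parses the result with int(); B never builds or parses a string: it keeps one integer accumulator and per character multiplies it by 10 (digits, letters 1-9) or 100 (letters 10-26) and adds the character's value, with the empty-input check done up front.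
import Mathlib
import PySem

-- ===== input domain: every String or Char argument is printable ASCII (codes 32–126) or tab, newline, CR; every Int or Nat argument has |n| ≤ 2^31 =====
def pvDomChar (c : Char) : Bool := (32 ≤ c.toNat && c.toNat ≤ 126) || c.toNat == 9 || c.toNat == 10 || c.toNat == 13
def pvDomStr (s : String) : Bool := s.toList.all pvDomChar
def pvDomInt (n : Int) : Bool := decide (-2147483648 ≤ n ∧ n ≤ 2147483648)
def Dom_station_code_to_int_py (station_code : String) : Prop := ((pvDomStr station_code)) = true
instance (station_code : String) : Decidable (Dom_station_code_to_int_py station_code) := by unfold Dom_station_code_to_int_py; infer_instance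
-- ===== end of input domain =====

-- B replaces A's algorithm (build a decimal string of per-character encodings, join, parse with int())
-- by pure integer arithmetic: one numeric accumulator shifted by 10 or 100 per character, no string
-- is ever built or parsed; objective: alternative. Equality is proved on the inputs where A returns
-- (Pre_ excludes A's two ValueError paths).

-- ===== PORT A =====
-- A's loop: for char in station_code.strip().upper(): append a piece or raise; none = ValueError
def pvAloop : List Char → List (List Char) → Option (List (List Char))
  | [], pieces => some pieces
  | c :: rest, pieces =>
    if PySem.Chars.isdigit c then
      pvAloop rest (pieces ++ [[c]])
    else if 'A' ≤ c ∧ c ≤ 'Z' then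
      pvAloop rest (pieces ++ [PySem.Int.toChars ((c.toNat : Int) - ('A'.toNat : Int) + 1)])
    else none

def station_code_to_int_py (station_code : String) : Int :=
  match pvAloop (PySem.Chars.upper (PySem.Chars.strip station_code.toList)) [] with
  | none => 0          -- ValueError "Caractere invalido": outside Pre_
  | some pieces =>
    if pieces = [] then 0          -- ValueError "vazio": outside Pre_
    else (PySem.Int.ofChars? (PySem.Chars.join [] pieces)).getD 0

-- ===== PORT B =====
-- B's loop: acc = acc * (10 or 100) + value(char); none = ValueError "Caractere invalido"
def pvBloop : List Char → Int → Option Int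
  | [], acc => some acc
  | c :: rest, acc =>
    if PySem.Chars.isdigit c then
      pvBloop rest (acc * 10 + ((c.toNat : Int) - ('0'.toNat : Int)))
    else if 'A' ≤ c ∧ c ≤ 'Z' then
      let n : Int := (c.toNat : Int) - ('A'.toNat : Int) + 1
      pvBloop rest (acc * (if 10 ≤ n then 100 else 10) + n)
    else none

def station_code_to_int_py_alt (station_code : String) : Int :=
  let normalized := PySem.Chars.upper (PySem.Chars.strip station_code.toList)
  if normalized = [] then 0          -- ValueError "vazio": outside Pre_
  else
    match pvBloop normalized 0 with
    | none => 0          -- ValueError "Caractere invalido": outside Pre_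
    | some acc => acc

-- ===== PRECONDITION & SPEC =====
-- Pre_ is exactly where Python A returns: the stripped, uppercased code is nonempty and
-- every one of its characters is a decimal digit or an uppercase letter (A raises ValueError otherwise).
def Pre_station_code_to_int_py (station_code : String) : Prop :=
  PySem.Chars.upper (PySem.Chars.strip station_code.toList) ≠ [] ∧
  ((PySem.Chars.upper (PySem.Chars.strip station_code.toList)).all
    (fun c => PySem.Chars.isdigit c || ('A' ≤ c && c ≤ 'Z'))) = true
instance (station_code : String) : Decidable (Pre_station_code_to_int_py station_code) := by
  unfold Pre_station_code_to_int_py; infer_instance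
def pvWitness_station_code_to_int_py : String := "a1Z"

def Spec_station_code_to_int_py (station_code : String) (out : Int) : Prop := out = station_code_to_int_py_alt station_code
instance (station_code : String) (out : Int) : Decidable (Spec_station_code_to_int_py station_code out) := by unfold Spec_station_code_to_int_py; infer_instance

-- ===== CLAIM (what is proved, stated in full; the proofs are below) =====
def Claim_equal_station_code_to_int_py : Prop := ∀ (station_code : String), Dom_station_code_to_int_py station_code → Pre_station_code_to_int_py station_code → Spec_station_code_to_int_py station_code (station_code_to_int_py station_code)

-- ===== LEMMAS AND PROOFS =====

-- A's per-character encoding (the piece appended for an admissible character)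
def pvEncSpec (c : Char) : List Char :=
  if PySem.Chars.isdigit c then [c]
  else PySem.Int.toChars ((c.toNat : Int) - ('A'.toNat : Int) + 1)

-- the numeric shift and value B uses per character, on the Nat side
def pvShiftN (c : Char) : Nat :=
  if PySem.Chars.isdigit c then 10
  else if 10 ≤ c.toNat - 'A'.toNat + 1 then 100 else 10
def pvValN (c : Char) : Nat :=
  if PySem.Chars.isdigit c then c.toNat - '0'.toNat else c.toNat - 'A'.toNat + 1

-- plain decimal fold over a digit list (the value int() computes on it)
def pvDec : List Char → Nat → Nat
  | [], acc => acc
  | c :: r, acc => pvDec r (acc * 10 + (c.toNat - '0'.toNat))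

-- B's fold, on the Nat side
def pvFoldN : List Char → Nat → Nat
  | [], acc => acc
  | c :: r, acc => pvFoldN r (acc * pvShiftN c + pvValN c)

-- int() seen with its internal digit scanner abstracted: ofChars? equals pvWrap2 go for a
-- scanner go satisfying the two defining equations below (witnessed by PySem's own scanner)
def pvWrap2 (go : List Char → Bool → Nat → Option Nat) (s : List Char) : Option Int :=
  have cs := (List.dropWhile PySem.Int.isIntSpace (List.dropWhile PySem.Int.isIntSpace s).reverse).reverse
  match cs with
  | '-' :: ds => Option.map (fun n => -n) (do let a ← (match ds with | [] => none | x => go x false 0); pure ((a : Nat) : Int))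
  | '+' :: ds => Option.map (fun n => n) (do let a ← (match ds with | [] => none | x => go x false 0); pure ((a : Nat) : Int))
  | ds => Option.map (fun n => n) (do let a ← (match ds with | [] => none | x => go x false 0); pure ((a : Nat) : Int))

theorem pvOfChars_scanner : ∃ (go : List Char → Bool → Nat → Option Nat),
    (PySem.Int.ofChars? = pvWrap2 go) ∧
    (∀ (b : Bool) (acc : Nat), go [] b acc = if b = true then some acc else none) ∧
    (∀ (c : Char) (rest : List Char) (b : Bool) (acc : Nat), go (c :: rest) b acc =
        if c.isDigit = true then go rest true (acc * 10 + (c.toNat - '0'.toNat))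
        else if c = '_' ∧ b = true then
          (match rest with
           | d :: _ => if d.isDigit = true then go rest false acc else none
           | [] => none)
        else none) :=
  ⟨_, rfl, fun _ _ => rfl, fun _ _ _ _ => rfl⟩

theorem pvIsIntSpace_of_digit (x : Char) (h : x.isDigit = true) :
    PySem.Int.isIntSpace x = false := by
  have hx : 48 ≤ x.toNat ∧ x.toNat ≤ 57 := by
    simpa [Char.isDigit, Char.le_def, UInt32.le_iff_toNat_le] using h
  have hne : ∀ d : Char, d.toNat < 48 → x ≠ d := by
    intro d hd he; rw [he] at hx; omega
  simp [PySem.Int.isIntSpace, hne ' ' (by decide), hne '\t' (by decide), hne '\n' (by decide),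
    hne '\x0d' (by decide), hne '\x0b' (by decide), hne '\x0c' (by decide)]

-- stripping int()'s surrounding whitespace is the identity on a nonempty digit list
theorem pvStrip_id (c : Char) (t : List Char)
    (h : ∀ x ∈ c :: t, x.isDigit = true) :
    (List.dropWhile PySem.Int.isIntSpace
      (List.dropWhile PySem.Int.isIntSpace (c :: t)).reverse).reverse = c :: t := by
  have h1 : List.dropWhile PySem.Int.isIntSpace (c :: t) = c :: t := by
    simp [pvIsIntSpace_of_digit c (h c (by simp))]
  rw [h1]
  cases hr : (c :: t).reverse with
  | nil => simp at hr
  | cons y ys =>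
    have hy : y ∈ c :: t := by
      rw [← List.mem_reverse, hr]; simp
    have h2 : List.dropWhile PySem.Int.isIntSpace (y :: ys) = y :: ys := by
      simp [pvIsIntSpace_of_digit y (h y hy)]
    rw [h2, ← hr, List.reverse_reverse]

-- int() on a nonempty plain digit list is the decimal fold
theorem pvOfChars_digits (c : Char) (t : List Char)
    (h : ∀ x ∈ c :: t, x.isDigit = true) :
    PySem.Int.ofChars? (c :: t) = some ((pvDec (c :: t) 0 : Nat) : Int) := by
  obtain ⟨go, hwrap, hnil, hcons⟩ := pvOfChars_scanner
  have hgo : ∀ (ds : List Char) (b : Bool) (acc : Nat), (∀ x ∈ ds, x.isDigit = true) → ds ≠ [] →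
      go ds b acc = some (pvDec ds acc) := by
    intro ds
    induction ds with
    | nil => intro b acc _ hne; exact absurd rfl hne
    | cons d r ih =>
      intro b acc hd _
      rw [hcons, if_pos (hd d (by simp))]
      cases r with
      | nil => rw [hnil]; rfl
      | cons e r' =>
        rw [ih true _ (fun x hx => hd x (by simp [hx])) (by simp)]
        rfl
  have hstrip := pvStrip_id c t h
  rw [hwrap]
  show (pvWrap2 go) (c :: t) = some ((pvDec (c :: t) 0 : Nat) : Int)
  unfold pvWrap2
  simp only [hstrip]
  split
  · next ds heq =>
      exfalso
      have hcm : c = '-' := (List.cons.injEq _ _ _ _ ▸ heq).1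
      have := h c (by simp)
      rw [hcm] at this
      simp [Char.isDigit] at this
  · next ds heq =>
      exfalso
      have hcp : c = '+' := (List.cons.injEq _ _ _ _ ▸ heq).1
      have := h c (by simp)
      rw [hcp] at this
      simp [Char.isDigit] at this
  · simp only [hgo (c :: t) false 0 h (by simp)]
    rfl

-- join with the empty separator is flatten
theorem pvJoin_flatten (l : List (List Char)) : PySem.Chars.join [] l = l.flatten := by
  induction l with
  | nil => simp [PySem.Chars.join, List.intercalate]
  | cons p r ih =>
    cases r with
    | nil => simp [PySem.Chars.join_singleton]
    | cons q rr => simp [PySem.Chars.join_cons_cons, ih]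

-- per-character facts: the encoding is a nonempty digit list whose decimal fold shifts the
-- accumulator by pvShiftN and adds pvValN
-- shifting the accumulator of the decimal fold
theorem pvDec_shift (xs : List Char) : ∀ acc, pvDec xs acc = acc * 10 ^ xs.length + pvDec xs 0 := by
  induction xs with
  | nil => intro acc; simp [pvDec]
  | cons c r ih =>
    intro acc
    show pvDec r (acc * 10 + (c.toNat - '0'.toNat)) = acc * 10 ^ (c :: r).length + pvDec r (0 * 10 + (c.toNat - '0'.toNat))
    rw [ih (acc * 10 + (c.toNat - '0'.toNat)), ih (0 * 10 + (c.toNat - '0'.toNat))]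
    simp [List.length_cons, pow_succ]
    ring

set_option maxRecDepth 16384 in
theorem pvEnc_char (c : Char)
    (hc : (PySem.Chars.isdigit c || ('A' ≤ c && c ≤ 'Z')) = true) :
    pvEncSpec c ≠ [] ∧ ((pvEncSpec c).all Char.isDigit) = true ∧
      pvDec (pvEncSpec c) 0 = pvValN c ∧ Nat.pow 10 (pvEncSpec c).length = pvShiftN c := by
  have hb : (48 ≤ c.toNat ∧ c.toNat ≤ 57) ∨ (65 ≤ c.toNat ∧ c.toNat ≤ 90) := by
    rcases Bool.or_eq_true_iff.mp hc with h' | h' <;>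
      [left; right] <;>
      simpa [PySem.Chars.isdigit, Char.le_def, UInt32.le_iff_toNat_le] using h'
  rw [← Char.ofNat_toNat c]
  rcases hb with ⟨h1, h2⟩ | ⟨h1, h2⟩ <;>
    · generalize c.toNat = n at h1 h2
      interval_cases n <;> exact ⟨by decide, by decide, by decide, by decide⟩

-- hence the fold over one encoding is B's numeric step
theorem pvEnc_step (c : Char)
    (hc : (PySem.Chars.isdigit c || ('A' ≤ c && c ≤ 'Z')) = true) (acc : Nat) :
    pvDec (pvEncSpec c) acc = acc * pvShiftN c + pvValN c := by
  rw [pvDec_shift, (pvEnc_char c hc).2.2.1, ← (pvEnc_char c hc).2.2.2, Nat.pow_eq]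

theorem pvDec_append (xs ys : List Char) : ∀ acc, pvDec (xs ++ ys) acc = pvDec ys (pvDec xs acc) := by
  induction xs with
  | nil => intro acc; rfl
  | cons c r ih => intro acc; simp [pvDec, ih]

-- the decimal fold of the flattened encodings is B's numeric fold
theorem pvDec_flatten (cs : List Char)
    (h : ∀ c ∈ cs, (PySem.Chars.isdigit c || ('A' ≤ c && c ≤ 'Z')) = true) :
    ∀ acc, pvDec ((cs.map pvEncSpec).flatten) acc = pvFoldN cs acc := by
  induction cs with
  | nil => intro acc; rfl
  | cons c r ih =>
    intro acc
    have hstep := pvEnc_step c (h c (by simp))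
    simp only [List.map_cons, List.flatten_cons, pvDec_append, hstep, pvFoldN]
    exact ih (fun x hx => h x (by simp [hx])) _

-- the flattened encodings are all digits, and nonempty when cs is
theorem pvFlatten_digits (cs : List Char)
    (h : ∀ c ∈ cs, (PySem.Chars.isdigit c || ('A' ≤ c && c ≤ 'Z')) = true) :
    ∀ x ∈ (cs.map pvEncSpec).flatten, x.isDigit = true := by
  intro x hx
  rcases List.mem_flatten.mp hx with ⟨p, hp, hxp⟩
  rcases List.mem_map.mp hp with ⟨c, hc, rfl⟩
  exact List.all_eq_true.mp (pvEnc_char c (h c hc)).2.1 x hxp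

-- B's loop computes pvFoldN (cast to Int) on admissible characters
theorem pvBloop_valid (cs : List Char)
    (h : ∀ c ∈ cs, (PySem.Chars.isdigit c || ('A' ≤ c && c ≤ 'Z')) = true) :
    ∀ acc : Nat, pvBloop cs (acc : Int) = some ((pvFoldN cs acc : Nat) : Int) := by
  induction cs with
  | nil => intro acc; rfl
  | cons c r ih =>
    intro acc
    have hc := h c (by simp)
    have hr := ih (fun x hx => h x (by simp [hx]))
    by_cases hd : PySem.Chars.isdigit c = true
    · have hge : 48 ≤ c.toNat := by
        simpa [PySem.Chars.isdigit, Char.le_def, UInt32.le_iff_toNat_le] using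
          (Bool.and_eq_true_iff.mp hd).1
      have hcast : (acc : Int) * 10 + ((c.toNat : Int) - ('0'.toNat : Int)) =
          ((acc * 10 + (c.toNat - '0'.toNat) : Nat) : Int) := by
        have h0 : '0'.toNat = 48 := rfl
        rw [h0]; omega
      simp only [pvBloop, hd, if_true, hcast, hr, pvFoldN, pvShiftN, pvValN]
    · have hl : ('A' ≤ c && c ≤ 'Z') = true := by
        rcases Bool.or_eq_true_iff.mp hc with h' | h'
        · exact absurd h' hd
        · exact h'
      have hl' : 'A' ≤ c ∧ c ≤ 'Z' := by simpa using hl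
      have hge : 65 ≤ c.toNat ∧ c.toNat ≤ 90 := by
        simpa [Char.le_def, UInt32.le_iff_toNat_le] using hl'
      have hcast : (acc : Int) * (if (10:Int) ≤ (c.toNat : Int) - ('A'.toNat : Int) + 1 then (100:Int) else 10) + ((c.toNat : Int) - ('A'.toNat : Int) + 1) =
          ((acc * (if 10 ≤ c.toNat - 'A'.toNat + 1 then (100:Nat) else 10) + (c.toNat - 'A'.toNat + 1) : Nat) : Int) := by
        have hA : 'A'.toNat = 65 := rfl
        rw [hA]
        split_ifs <;> omega
      simp only [pvBloop, hd, if_false, Bool.false_eq_true, hl', hcast, hr,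
        pvFoldN, pvShiftN, pvValN]
      simp

-- A's loop collects exactly the per-character encodings
theorem pvAloop_valid (cs : List Char) :
    ∀ pieces, (∀ c ∈ cs, (PySem.Chars.isdigit c || ('A' ≤ c && c ≤ 'Z')) = true) →
    pvAloop cs pieces = some (pieces ++ cs.map pvEncSpec) := by
  induction cs with
  | nil => intro pieces _; simp [pvAloop]
  | cons c rest ih =>
    intro pieces hv
    have hc := hv c (by simp)
    have hrest : ∀ c ∈ rest, (PySem.Chars.isdigit c || ('A' ≤ c && c ≤ 'Z')) = true :=
      fun d hd => hv d (by simp [hd])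
    by_cases hd : PySem.Chars.isdigit c = true
    · simp only [pvAloop, hd, if_true, ih _ hrest, List.map_cons, pvEncSpec]
      simp [List.append_assoc]
    · have hl : ('A' ≤ c && c ≤ 'Z') = true := by
        rcases Bool.or_eq_true_iff.mp hc with h' | h'
        · exact absurd h' hd
        · exact h'
      have hl' : 'A' ≤ c ∧ c ≤ 'Z' := by simpa using hl
      simp only [pvAloop, hd, if_false, Bool.false_eq_true, hl', ih _ hrest,
        List.map_cons, pvEncSpec]
      simp [List.append_assoc]

-- ===== VERDICT (by name: the statement is the Claim_ definition above) =====
theorem station_code_to_int_py_spec : Claim_equal_station_code_to_int_py := by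
  intro s _ hpre
  rcases hpre with ⟨hne, hall⟩
  have hval : ∀ c ∈ PySem.Chars.upper (PySem.Chars.strip s.toList),
      (PySem.Chars.isdigit c || ('A' ≤ c && c ≤ 'Z')) = true := List.all_eq_true.mp hall
  show station_code_to_int_py s = station_code_to_int_py_alt s
  cases hcs : PySem.Chars.upper (PySem.Chars.strip s.toList) with
  | nil => exact absurd hcs hne
  | cons c rest =>
    have hval' : ∀ d ∈ c :: rest, (PySem.Chars.isdigit d || ('A' ≤ d && d ≤ 'Z')) = true := by
      rw [← hcs]; exact hval
    -- A side
    have hA := pvAloop_valid (c :: rest) [] hval'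
    have hdig := pvFlatten_digits (c :: rest) hval'
    have hflat := pvDec_flatten (c :: rest) hval' 0
    have hB := pvBloop_valid (c :: rest) hval' 0
    rw [station_code_to_int_py, station_code_to_int_py_alt]
    simp only [hcs, hA]
    cases hj : ((c :: rest).map pvEncSpec).flatten with
    | nil =>
      exfalso
      have hne1 := (pvEnc_char c (hval' c (by simp))).1
      rw [List.map_cons, List.flatten_cons] at hj
      exact hne1 (List.append_eq_nil_iff.mp hj).1
    | cons d ds =>
      have hd' : ∀ x ∈ d :: ds, x.isDigit = true := by rw [← hj]; exact hdig
      have hof := pvOfChars_digits d ds hd'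
      have hval0 : pvDec (d :: ds) 0 = pvFoldN (c :: rest) 0 := by rw [← hj]; exact hflat
      have hjoin : PySem.Chars.join [] ((c :: rest).map pvEncSpec) = d :: ds := by
        rw [pvJoin_flatten, hj]
      rw [List.nil_append, if_neg (by simp : ¬(List.map pvEncSpec (c :: rest) = [])),
          if_neg (by simp : ¬(c :: rest = [])), hjoin, hof]
      rw [show ((0 : Nat) : Int) = (0 : Int) from rfl] at hB
      rw [hB, hval0]
      rfl
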